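-- pv_equiv track=rewrite | github.com/fbundle/sorts | cmd/elt/elt.py | transform_arrow_in_parens
-- ===== SOURCE A (Python) =====
-- from typing import Tuple, List
--
-- def transform_arrow_in_parens(tokens: List[str]) -> List[str]:
--     out: List[str] = []
--     i = 0
--     while i < len(tokens):
--         if tokens[i] == "(":
--             # find next close ) at same level (no deep nesting expected in input)
--             j = i + 1
--             depth = 1
--             while j < len(tokens) and depth > 0:
--                 if tokens[j] == "(":
--                     depth += 1
--                 elif tokens[j] == ")":
--                     depth -= 1
--                 j += 1
--             # j is index after matching ')'
--             inner = tokens[i+1:j-1] if j-1 > i+1 else []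
--             if "->" in inner and depth == 0:
--                 k = inner.index("->")
--                 left = [t for t in inner[:k] if t]
--                 right = [t for t in inner[k+1:] if t]
--                 out.append("(")
--                 out.append("->")
--                 out.extend(left)
--                 out.extend(right)
--                 out.append(")")
--             else:
--                 out.extend(tokens[i:j])
--             i = j
--         else:
--             out.append(tokens[i])
--             i += 1
--     return out
-- ===== SOURCE B (Python) =====
-- from typing import List
--
-- def _emit_group(buf: List[str]) -> List[str]:
--     inner = buf[1:-1]
--     if "->" in inner:
--         k = inner.index("->")
--         return (["(", "->"]
--                 + [t for t in inner[:k] if t]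
--                 + [t for t in inner[k+1:] if t]
--                 + [")"])
--     return buf
--
-- def transform_arrow_in_parens(tokens: List[str]) -> List[str]:
--     out: List[str] = []
--     depth = 0
--     buf: List[str] = []
--     for t in tokens:
--         if depth == 0:
--             if t == "(":
--                 depth = 1
--                 buf = ["("]
--             else:
--                 out.append(t)
--         else:
--             buf.append(t)
--             if t == "(":
--                 depth += 1
--             elif t == ")":
--                 depth -= 1
--             if depth == 0:
--                 out.extend(_emit_group(buf))
--                 buf = []
--     out.extend(buf)
--     return out
-- ===== Notes on version B (the rewrite author's own statement) =====
-- stated objective: alternative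
-- what changed: Replaces the index-based lookahead parser (inner while-loop re-scanning for the matching close paren, then slicing the token list) by a single streaming fold that carries a depth counter and a group buffer, flushing each completed group through a separate emit helper.
import Mathlib
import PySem

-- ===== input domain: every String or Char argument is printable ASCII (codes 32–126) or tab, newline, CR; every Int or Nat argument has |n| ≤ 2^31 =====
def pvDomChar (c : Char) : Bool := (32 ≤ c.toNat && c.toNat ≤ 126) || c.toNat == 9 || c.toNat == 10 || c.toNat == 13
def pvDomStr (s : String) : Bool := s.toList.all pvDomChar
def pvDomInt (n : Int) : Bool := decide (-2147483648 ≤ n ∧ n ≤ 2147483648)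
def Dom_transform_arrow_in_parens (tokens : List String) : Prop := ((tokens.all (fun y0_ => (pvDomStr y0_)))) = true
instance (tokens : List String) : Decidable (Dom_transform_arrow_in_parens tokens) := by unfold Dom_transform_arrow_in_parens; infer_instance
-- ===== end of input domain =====

-- B replaces A's index-based lookahead parser by a streaming fold with a depth counter
-- and a group buffer (same cost; a different decomposition). Return value only; neither
-- version mutates its argument.

-- ===== PORT A =====
-- A's inner while-loop: 'j = i+1; depth = 1; while j < len(tokens) and depth > 0: ...'
def pvInnerScan (tokens : List String) (j : Nat) (depth : Int) : Nat × Int :=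
  if h : j < tokens.length ∧ 0 < depth then
    pvInnerScan tokens (j + 1)
      (if tokens[j]'h.1 = "(" then depth + 1
       else if tokens[j]'h.1 = ")" then depth - 1 else depth)
  else (j, depth)
termination_by tokens.length - j

theorem pvInnerScan_ge (tokens : List String) (j : Nat) (depth : Int) :
    j ≤ (pvInnerScan tokens j depth).1 := by
  induction j, depth using pvInnerScan.induct (tokens := tokens) with
  | case1 j depth h ih =>
    rw [pvInnerScan, dif_pos h]
    simp only [dite_eq_ite] at ih
    omega
  | case2 j depth h => rw [pvInnerScan, dif_neg h]

-- A's outer while-loop over the index i and the accumulator out.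
def pvMainLoop (tokens : List String) (i : Nat) (out : List String) : List String :=
  if h : i < tokens.length then
    if tokens[i] = "(" then
      let p := pvInnerScan tokens (i + 1) 1
      let j := p.1
      -- inner = tokens[i+1:j-1] if j-1 > i+1 else []
      let inner : List String :=
        if i + 1 < j - 1 then
          PySem.List.slice tokens (some ((i + 1 : Nat) : Int)) (some ((j - 1 : Nat) : Int))
        else []
      let out' :=
        if "->" ∈ inner ∧ p.2 = 0 then
          -- k = inner.index("->")  (membership just checked, so index? is some)
          let k := (PySem.List.index? inner "->").getD 0
          out ++ ["(", "->"]
            ++ (PySem.List.slice inner none (some ((k : Nat) : Int))).filter (fun t => !(t == ""))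
            ++ (PySem.List.slice inner (some ((k + 1 : Nat) : Int)) none).filter (fun t => !(t == ""))
            ++ [")"]
        else
          out ++ PySem.List.slice tokens (some ((i : Nat) : Int)) (some ((j : Nat) : Int))
      pvMainLoop tokens j out'
    else
      pvMainLoop tokens (i + 1) (out ++ [tokens[i]])
  else out
termination_by tokens.length - i
decreasing_by
  · have := pvInnerScan_ge tokens (i + 1) 1; omega
  · omega

def transform_arrow_in_parens (tokens : List String) : List String :=
  pvMainLoop tokens 0 []

-- ===== PORT B =====
-- _emit_group(buf): buf[1:-1] is (buf.drop 1).dropLast (exact: Python slice [1:-1]).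
def pvEmitGroup (buf : List String) : List String :=
  let inner := (buf.drop 1).dropLast
  if "->" ∈ inner then
    let k := (PySem.List.index? inner "->").getD 0
    ["(", "->"]
      ++ (inner.take k).filter (fun t => !(t == ""))
      ++ (inner.drop (k + 1)).filter (fun t => !(t == ""))
      ++ [")"]
  else buf

-- one step of B's streaming pass: state = (out, depth, buf)
def pvStep (s : List String × Int × List String) (t : String) : List String × Int × List String :=
  let (out, depth, buf) := s
  if depth = 0 then
    if t = "(" then (out, 1, ["("]) else (out ++ [t], 0, [])
  else
    let buf' := buf ++ [t]
    let depth' := if t = "(" then depth + 1 else if t = ")" then depth - 1 else depth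
    if depth' = 0 then (out ++ pvEmitGroup buf', 0, []) else (out, depth', buf')

def transform_arrow_in_parens_alt (tokens : List String) : List String :=
  let s := tokens.foldl pvStep ([], 0, [])
  s.1 ++ s.2.2

-- ===== PRECONDITION & SPEC =====
def Spec_transform_arrow_in_parens (tokens : List String) (out : List String) : Prop := out = transform_arrow_in_parens_alt tokens
instance (tokens : List String) (out : List String) : Decidable (Spec_transform_arrow_in_parens tokens out) := by unfold Spec_transform_arrow_in_parens; infer_instance

-- ===== CLAIM (what is proved, stated in full; the proofs are below) =====
def Claim_equal_transform_arrow_in_parens : Prop := ∀ (tokens : List String), Dom_transform_arrow_in_parens tokens → Spec_transform_arrow_in_parens tokens (transform_arrow_in_parens tokens)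

-- ===== LEMMAS AND PROOFS =====

-- list-level version of A's inner scan: (#tokens consumed, final depth)
def pvScanL : List String → Int → Nat × Int
  | [], d => (0, d)
  | t :: l, d =>
    if 0 < d then
      let d' := if t = "(" then d + 1 else if t = ")" then d - 1 else d
      let r := pvScanL l d'
      (r.1 + 1, r.2)
    else (0, d)

theorem pvScanL_le (l : List String) (d : Int) : (pvScanL l d).1 ≤ l.length := by
  induction l generalizing d with
  | nil => simp [pvScanL]
  | cons t l ih =>
    simp only [pvScanL, List.length_cons]
    split
    · have := ih (if t = "(" then d + 1 else if t = ")" then d - 1 else d); omega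
    · simp

theorem pvScanL_stop (l : List String) (d : Int) (hd : 0 ≤ d) (h : (pvScanL l d).2 ≠ 0) :
    (pvScanL l d).1 = l.length := by
  induction l generalizing d with
  | nil => simp [pvScanL]
  | cons t l ih =>
    simp only [pvScanL, List.length_cons] at h ⊢
    by_cases hpos : 0 < d
    · simp only [if_pos hpos] at h ⊢
      rw [ih _ (by split_ifs <;> omega) h]
    · simp only [if_neg hpos] at h; omega

theorem pvScanL_pos (l : List String) (d : Int) (hd : 0 < d) (h : (pvScanL l d).2 = 0) :
    1 ≤ (pvScanL l d).1 := by
  cases l with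
  | nil => simp [pvScanL] at h; omega
  | cons t l => simp only [pvScanL, if_pos hd]; omega

theorem pvInnerScan_eq_scanL (tokens : List String) (j : Nat) (d : Int) :
    pvInnerScan tokens j d =
      (j + (pvScanL (tokens.drop j) d).1, (pvScanL (tokens.drop j) d).2) := by
  induction j, d using pvInnerScan.induct (tokens := tokens) with
  | case1 j d h ih =>
    rw [pvInnerScan, dif_pos h]
    simp only [dite_eq_ite] at ih
    rw [ih, List.drop_eq_getElem_cons h.1]
    simp only [pvScanL, if_pos h.2]
    rw [Prod.mk.injEq]
    exact ⟨by omega, rfl⟩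
  | case2 j d h =>
    rw [pvInnerScan, dif_neg h]
    by_cases hj : j < tokens.length
    · rw [List.drop_eq_getElem_cons hj]
      have hd : ¬ 0 < d := fun hd' => h ⟨hj, hd'⟩
      simp [pvScanL, hd]
    · rw [List.drop_of_length_le (by omega)]
      simp [pvScanL]

-- B's fold while buffering (depth > 0): it consumes exactly pvScanL's prefix
theorem pvFold_buf (l : List String) (out buf : List String) (d : Int) (hd : 0 < d) :
    l.foldl pvStep (out, d, buf) =
      (if (pvScanL l d).2 = 0 then
        (l.drop (pvScanL l d).1).foldl pvStep
          (out ++ pvEmitGroup (buf ++ l.take (pvScanL l d).1), 0, [])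
      else (out, (pvScanL l d).2, buf ++ l)) := by
  induction l generalizing out buf d with
  | nil =>
    simp only [List.foldl_nil, pvScanL]
    rw [if_neg (by omega)]
    simp
  | cons t l ih =>
    simp only [List.foldl_cons, pvScanL, if_pos hd]
    have hstep : pvStep (out, d, buf) t =
        (if (if t = "(" then d + 1 else if t = ")" then d - 1 else d) = 0 then
          (out ++ pvEmitGroup (buf ++ [t]), 0, [])
        else (out, (if t = "(" then d + 1 else if t = ")" then d - 1 else d), buf ++ [t])) := by
      simp only [pvStep]
      rw [if_neg (by omega)]
    set d' := (if t = "(" then d + 1 else if t = ")" then d - 1 else d) with hd'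
    by_cases h0 : d' = 0
    · rw [hstep, if_pos h0]
      have : pvScanL l d' = (0, 0) := by
        cases l <;> simp [pvScanL, h0]
      simp [this]
    · rw [hstep, if_neg h0]
      have hd'pos : 0 < d' := by rw [hd'] at h0 ⊢; split_ifs at h0 ⊢ <;> omega
      rw [ih _ _ _ hd'pos]
      by_cases hdf : (pvScanL l d').2 = 0
      · rw [if_pos hdf, if_pos hdf]
        simp [List.take_succ_cons, List.drop_succ_cons]
      · rw [if_neg hdf, if_neg hdf]
        simp

theorem dropLast_take_of_le {α : Type} (l : List α) (n : Nat) (h : n ≤ l.length) :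
    (l.take n).dropLast = l.take (n - 1) := by
  rw [List.dropLast_eq_take, List.length_take, List.take_take]
  congr 1
  omega

theorem pvMainLoop_eq (tokens : List String) (m : Nat) :
    ∀ (i : Nat) (out : List String), tokens.length - i ≤ m →
      pvMainLoop tokens i out =
        ((tokens.drop i).foldl pvStep (out, 0, [])).1 ++
          ((tokens.drop i).foldl pvStep (out, 0, [])).2.2 := by
  induction m with
  | zero =>
    intro i out hm
    rw [pvMainLoop, dif_neg (by omega), List.drop_of_length_le (by omega), List.foldl_nil]
    simp
  | succ m ih =>
    intro i out hm
    by_cases h : i < tokens.length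
    · by_cases hpar : tokens[i] = "("
      · rw [pvMainLoop, dif_pos h, if_pos hpar]
        simp only [dite_eq_ite]
        have hq := pvInnerScan_eq_scanL tokens (i + 1) 1
        rw [hq]
        have hcons : tokens.drop i = "(" :: tokens.drop (i + 1) := by
          rw [List.drop_eq_getElem_cons h, hpar]
        rw [hcons, List.foldl_cons]
        have hstep0 : pvStep (out, 0, []) "(" = (out, 1, ["("]) := by simp [pvStep]
        rw [hstep0, pvFold_buf _ _ _ _ (by omega)]
        set rest := tokens.drop (i + 1) with hrest
        set n := (pvScanL rest 1).1 with hn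
        set df := (pvScanL rest 1).2 with hdf
        have hnle : n ≤ rest.length := by rw [hn]; exact pvScanL_le rest 1
        have hrlen : rest.length = tokens.length - (i + 1) := by
          rw [hrest, List.length_drop]
        by_cases h0 : df = 0
        · rw [if_pos h0]
          have hn1 : 1 ≤ n := by
            rw [hn]; exact pvScanL_pos rest 1 (by omega) (by rw [← hdf]; exact h0)
          have hinner :
              (if i + 1 < (i + 1 + n, df).1 - 1 then
                PySem.List.slice tokens (some ((i + 1 : Nat) : Int))
                  (some (((i + 1 + n, df).1 - 1 : Nat) : Int))
              else []) = rest.take (n - 1) := by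
            simp only
            by_cases hc : i + 1 < i + 1 + n - 1
            · rw [if_pos hc]
              have hb : i + 1 + n - 1 = (i + 1) + (n - 1) := by omega
              rw [hb, PySem.List.slice_natCast, ← hrest]
              congr 1
              omega
            · rw [if_neg hc]
              have : n - 1 = 0 := by omega
              rw [this, List.take_zero]
          simp only at hinner ⊢
          rw [hinner]
          -- unfold B's emit helper on the flushed buffer
          rw [pvEmitGroup]
          simp only [List.singleton_append, List.drop_succ_cons, List.drop_zero]
          rw [dropLast_take_of_le rest n hnle]
          simp only [h0, and_true]
          by_cases hmem : "->" ∈ rest.take (n - 1)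
          · rw [if_pos hmem, if_pos hmem]
            rw [PySem.List.slice_to_natCast, PySem.List.slice_from_natCast]
            rw [ih _ _ (by omega)]
            have hdropj : tokens.drop (i + 1 + n) = rest.drop n := by
              rw [hrest, List.drop_drop]
            rw [hdropj]
            simp [List.append_assoc]
          · rw [if_neg hmem, if_neg hmem]
            have hslice :
                PySem.List.slice tokens (some ((i : Nat) : Int))
                  (some ((i + 1 + n : Nat) : Int)) = "(" :: rest.take n := by
              have hb : i + 1 + n = i + (n + 1) := by omega
              rw [hb, PySem.List.slice_natCast, hcons]
              have : i + (n + 1) - i = n + 1 := by omega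
              rw [this, List.take_succ_cons]
            rw [hslice, ih _ _ (by omega)]
            rw [hrest, List.drop_drop]
        · rw [if_neg h0]
          have hall : n = rest.length := by
            rw [hn]
            exact pvScanL_stop rest 1 (by omega) (by rw [← hdf]; exact h0)
          have hjlen : i + 1 + n = tokens.length := by omega
          rw [if_neg (fun hc => h0 hc.2)]
          have hslice :
              PySem.List.slice tokens (some ((i : Nat) : Int))
                (some ((i + 1 + n : Nat) : Int)) = "(" :: rest := by
            have hb : i + 1 + n = i + (n + 1) := by omega
            rw [hb, PySem.List.slice_natCast, hcons]
            have : i + (n + 1) - i = n + 1 := by omega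
            rw [this, List.take_succ_cons, List.take_of_length_le (by omega)]
          rw [hslice, pvMainLoop, dif_neg (by omega)]
          simp
      · rw [pvMainLoop, dif_pos h, if_neg hpar]
        rw [ih _ _ (by omega), List.drop_eq_getElem_cons h, List.foldl_cons]
        have : pvStep (out, 0, []) tokens[i] = (out ++ [tokens[i]], 0, []) := by
          simp [pvStep, hpar]
        rw [this]
    · rw [pvMainLoop, dif_neg h, List.drop_of_length_le (by omega), List.foldl_nil]
      simp

-- ===== VERDICT (by name: the statement is the Claim_ definition above) =====
theorem transform_arrow_in_parens_spec : Claim_equal_transform_arrow_in_parens := by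
  intro tokens _
  show transform_arrow_in_parens tokens = transform_arrow_in_parens_alt tokens
  rw [transform_arrow_in_parens, transform_arrow_in_parens_alt,
    pvMainLoop_eq tokens tokens.length 0 [] (by omega), List.drop_zero]
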